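-- pv_equiv track=rewrite | github.com/d1zm4as/CodeWars | Python/7 Kyu/multiply_adjacent_digits.py | digit_multiplication
-- ===== SOURCE A (Python) =====
-- def digit_multiplication(s):
--     total = 0
--     current_product = 1
--     current_sign = 1
--
--     for char in s:
--         if char.isdigit():
--             current_product *= int(char)
--         else:
--             total += current_sign * current_product
--             current_product = 1
--             current_sign = 1 if char == '+' else -1
--
--     total += current_sign * current_product
--     return total
-- ===== SOURCE B (Python) =====
-- def digit_multiplication(s):
--     # Phase 1: tokenize into (sign, digit-values) groups; first group's sign is +1.
--     tokens = [(1, [])]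
--     for ch in s:
--         if ch.isdigit():
--             tokens[-1][1].append(int(ch))
--         else:
--             tokens.append((1 if ch == '+' else -1, []))
--     # Phase 2: reduce each group to its product and sum with signs.
--     def prod(ds):
--         p = 1
--         for d in ds:
--             p *= d
--         return p
--     return sum(sign * prod(ds) for sign, ds in tokens)
-- ===== Notes on version B (the rewrite author's own statement) =====
-- stated objective: alternative
-- what changed: Replaces A's single-pass state machine (running total, current product, current sign) with a two-phase tokenize-then-reduce: first build a list of (sign, digit-group) tokens, then sum each group's product with its sign.
import Mathlib
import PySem

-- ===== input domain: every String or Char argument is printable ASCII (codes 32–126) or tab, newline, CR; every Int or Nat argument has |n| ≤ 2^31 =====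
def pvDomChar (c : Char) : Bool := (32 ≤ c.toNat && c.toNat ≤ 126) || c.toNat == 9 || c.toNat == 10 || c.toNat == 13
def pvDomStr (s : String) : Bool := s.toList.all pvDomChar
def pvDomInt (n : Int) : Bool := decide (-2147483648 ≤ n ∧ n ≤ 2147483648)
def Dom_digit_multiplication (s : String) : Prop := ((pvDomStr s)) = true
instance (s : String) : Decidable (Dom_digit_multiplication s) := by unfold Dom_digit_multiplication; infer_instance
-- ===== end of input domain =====

-- B tokenizes the string into (sign, digit-group) tokens and then reduces them
-- with a product-and-sum pass, instead of A's single-pass state machine (objective: alternative).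


-- ===== PORT A =====
-- state = (total, current_product, current_sign); int(char) on a digit char is exactly c.toNat - 48
def pvStepA (st : Int × Int × Int) (c : Char) : Int × Int × Int :=
  if PySem.Chars.isdigit c then (st.1, st.2.1 * ((c.toNat : Int) - 48), st.2.2)
  else (st.1 + st.2.2 * st.2.1, 1, if c == '+' then 1 else -1)

def digit_multiplication (s : String) : Int :=
  let st := s.toList.foldl pvStepA (0, 1, 1)
  st.1 + st.2.2 * st.2.1

-- ===== PORT B =====
-- Source B's token list is kept head-first (newest token first) and reversed before the reduce:
-- tokens[-1][1].append(d) is an update of the head, tokens.append(t) is a cons.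
def pvTokStep (toks : List (Int × List Int)) (c : Char) : List (Int × List Int) :=
  if PySem.Chars.isdigit c then
    match toks with
    | t :: rest => (t.1, t.2 ++ [(c.toNat : Int) - 48]) :: rest
    | [] => []
  else ((if c == '+' then 1 else -1), []) :: toks

def pvProd (ds : List Int) : Int := ds.foldl (fun p d => p * d) 1

def digit_multiplication_alt (s : String) : Int :=
  let toks := s.toList.foldl pvTokStep [(1, [])]
  toks.reverse.foldl (fun tot t => tot + t.1 * pvProd t.2) 0

-- ===== PRECONDITION & SPEC =====
def Spec_digit_multiplication (s : String) (out : Int) : Prop := out = digit_multiplication_alt s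
instance (s : String) (out : Int) : Decidable (Spec_digit_multiplication s out) := by unfold Spec_digit_multiplication; infer_instance

-- ===== CLAIM (what is proved, stated in full; the proofs are below) =====
def Claim_equal_digit_multiplication : Prop := ∀ (s : String), Dom_digit_multiplication s → Spec_digit_multiplication s (digit_multiplication s)

-- ===== LEMMAS AND PROOFS =====
def pvSumT (l : List (Int × List Int)) : Int := (l.map (fun t => t.1 * pvProd t.2)).sum

theorem pvFoldl_sumT (l : List (Int × List Int)) (a : Int) :
    l.foldl (fun tot t => tot + t.1 * pvProd t.2) a = a + pvSumT l := by
  induction l generalizing a with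
  | nil => simp [pvSumT]
  | cons t l ih => simp [pvSumT, ih, List.map_cons, List.sum_cons]; ring

theorem pvProd_append (ds : List Int) (d : Int) : pvProd (ds ++ [d]) = pvProd ds * d := by
  simp [pvProd, List.foldl_append]

theorem pvTok_append (cs : List Char) (cur : Int × List Int) (rest : List (Int × List Int)) :
    cs.foldl pvTokStep (cur :: rest) = cs.foldl pvTokStep [cur] ++ rest := by
  induction cs generalizing cur rest with
  | nil => simp
  | cons c cs ih =>
    rw [List.foldl_cons, List.foldl_cons]
    by_cases h : PySem.Chars.isdigit c = true
    · simp only [pvTokStep]; rw [if_pos h, if_pos h]; exact ih _ _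
    · simp only [pvTokStep]; rw [if_neg h, if_neg h, ih, ih _ [cur]]
      simp

theorem pvKey (cs : List Char) (total sign : Int) (ds : List Int) :
    let st := cs.foldl pvStepA (total, pvProd ds, sign)
    st.1 + st.2.2 * st.2.1 = total + pvSumT ((cs.foldl pvTokStep [(sign, ds)]).reverse) := by
  induction cs generalizing total sign ds with
  | nil => simp [pvSumT]
  | cons c cs ih =>
    rw [List.foldl_cons, List.foldl_cons]
    by_cases h : PySem.Chars.isdigit c = true
    · simp only [pvStepA, pvTokStep]; rw [if_pos h, if_pos h]
      have := ih total sign (ds ++ [(c.toNat : Int) - 48])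
      rw [pvProd_append] at this
      exact this
    · simp only [pvStepA, pvTokStep]; rw [if_neg h, if_neg h]
      rw [pvTok_append cs ((if c == '+' then 1 else -1), []) [(sign, ds)]]
      have hnil : pvProd ([] : List Int) = 1 := rfl
      have h2 := ih (total + sign * pvProd ds) (if c == '+' then 1 else -1) []
      rw [hnil] at h2
      rw [List.reverse_append]
      refine Eq.trans h2 ?_
      simp only [pvSumT, List.map_append, List.sum_append, List.reverse_cons, List.reverse_nil,
        List.nil_append, List.map_cons, List.map_nil, List.sum_cons, List.sum_nil]
      ring

-- ===== VERDICT (by name: the statement is the Claim_ definition above) =====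
theorem digit_multiplication_spec : Claim_equal_digit_multiplication := by
  intro s _
  unfold Spec_digit_multiplication digit_multiplication digit_multiplication_alt
  rw [pvFoldl_sumT]
  have := pvKey s.toList 0 1 []
  simp only [pvProd, List.foldl_nil] at this
  simpa using this
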